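-- pv_equiv track=rewrite | github.com/wushang549/ProyectoIntegradorBE | services/validation.py | detect_text_column
-- ===== SOURCE A (Python) =====
-- TEXT_COLUMN_ALIAS_PRIORITY = ("text", "transcript", "message", "content", "review", "comment", "body", "feedback")
--
-- def detect_text_column(columns: list[str]) -> str | None:
--     by_lower: dict[str, list[str]] = {}
--     for col in columns:
--         key = (col or "").strip().lower()
--         if not key:
--             continue
--         by_lower.setdefault(key, []).append(col)
--
--     for alias in TEXT_COLUMN_ALIAS_PRIORITY:
--         candidates = by_lower.get(alias, [])
--         if not candidates:
--             continue
--         preferred = (alias, alias.capitalize(), alias.upper())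
--         for pref in preferred:
--             if pref in candidates:
--                 return pref
--         return candidates[0]
--     return None
-- ===== SOURCE B (Python) =====
-- TEXT_COLUMN_ALIAS_PRIORITY = ("text", "transcript", "message", "content", "review", "comment", "body", "feedback")
--
-- def detect_text_column(columns):
--     for alias in TEXT_COLUMN_ALIAS_PRIORITY:
--         candidates = [col for col in columns if col.strip().lower() == alias]
--         if not candidates:
--             continue
--         for pref in (alias, alias.capitalize(), alias.upper()):
--             if pref in candidates:
--                 return pref
--         return candidates[0]
--     return None
-- ===== Notes on version B (the rewrite author's own statement) =====
-- stated objective: simpler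
-- what changed: B removes A's grouping dict (setdefault/append index keyed by stripped-lowered name) and instead, for each alias in priority order, filters the columns list directly for matching original names, applying the same preferred-casing choice.
import Mathlib
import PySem

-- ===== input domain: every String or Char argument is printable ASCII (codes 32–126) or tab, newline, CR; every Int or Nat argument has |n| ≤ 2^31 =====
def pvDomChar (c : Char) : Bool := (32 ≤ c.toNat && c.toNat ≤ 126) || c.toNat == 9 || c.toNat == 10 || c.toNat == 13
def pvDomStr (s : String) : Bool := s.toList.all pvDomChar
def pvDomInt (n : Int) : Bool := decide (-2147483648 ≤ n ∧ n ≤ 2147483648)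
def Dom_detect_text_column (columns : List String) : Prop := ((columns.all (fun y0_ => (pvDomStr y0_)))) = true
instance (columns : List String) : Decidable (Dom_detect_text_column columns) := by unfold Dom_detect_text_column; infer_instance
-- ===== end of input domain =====

-- B drops A's grouping dict and rescans the columns list per al; return values agree everywhere (same preferred-casing choice).

-- ===== PORT A =====
def pvAliases : List String := ["text", "transcript", "message", "content", "review", "comment", "body", "feedback"]

-- s.capitalize() (exact on ASCII): first char uppercased, rest lowercased
def pvCapitalize (s : String) : String :=
  match s.toList with
  | [] => ""
  | c :: cs => String.ofList (PySem.Chars.upperChar c :: PySem.Chars.lower cs)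

-- (col or "").strip().lower()
def pvKeyA (col : String) : String :=
  PySem.Str.lower (PySem.Str.strip (if col = "" then "" else col))

-- second loop of A: for al in TEXT_COLUMN_ALIAS_PRIORITY …
def detectA_loop (by_lower : PySem.Dict String (List String)) : List String → Option String
  | [] => none
  | al :: rest =>
    let candidates := by_lower.getD al []
    if candidates = [] then detectA_loop by_lower rest
    else
      match [al, pvCapitalize al, PySem.Str.upper al].find? (fun pref => candidates.contains pref) with
      | some pref => some pref
      | none => candidates.head? |>.getD ""  |> some

def detect_text_column (columns : List String) : Option String :=
  let by_lower : PySem.Dict String (List String) :=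
    columns.foldl (fun d col =>
      let key := pvKeyA col
      if key = "" then d else d.modify key [] (fun v => v ++ [col])) PySem.Dict.empty
  detectA_loop by_lower pvAliases

-- ===== PORT B =====
def detectB_loop (columns : List String) : List String → Option String
  | [] => none
  | al :: rest =>
    let candidates := columns.filter (fun col => PySem.Str.lower (PySem.Str.strip col) == al)
    if candidates = [] then detectB_loop columns rest
    else
      match [al, pvCapitalize al, PySem.Str.upper al].find? (fun pref => candidates.contains pref) with
      | some pref => some pref
      | none => candidates.head? |>.getD "" |> some

def detect_text_column_alt (columns : List String) : Option String :=
  detectB_loop columns pvAliases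

-- ===== PRECONDITION & SPEC =====
def Spec_detect_text_column (columns : List String) (out : Option String) : Prop := out = detect_text_column_alt columns
instance (columns : List String) (out : Option String) : Decidable (Spec_detect_text_column columns out) := by unfold Spec_detect_text_column; infer_instance

-- ===== CLAIM (what is proved, stated in full; the proofs are below) =====
def Claim_equal_detect_text_column : Prop := ∀ (columns : List String), Dom_detect_text_column columns → Spec_detect_text_column columns (detect_text_column columns)

-- ===== LEMMAS AND PROOFS =====
theorem pvKeyA_eq (col : String) : pvKeyA col = PySem.Str.lower (PySem.Str.strip col) := by
  unfold pvKeyA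
  split <;> simp_all

-- the dict group for a nonempty al is the filter of the columns list
theorem getD_fold (l : List String) (d : PySem.Dict String (List String)) (al : String)
    (h : al ≠ "") :
    (l.foldl (fun d col =>
      let key := pvKeyA col
      if key = "" then d else d.modify key [] (fun v => v ++ [col])) d).getD al []
    = d.getD al [] ++ l.filter (fun col => PySem.Str.lower (PySem.Str.strip col) == al) := by
  induction l generalizing d with
  | nil => simp
  | cons c cs ih =>
    simp only [List.foldl_cons, List.filter_cons]
    by_cases hk : pvKeyA c = ""
    · have : (PySem.Str.lower (PySem.Str.strip c) == al) = false := by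
        rw [← pvKeyA_eq, hk]
        simp [Ne.symm h]
      simp [hk, this, ih]
    · rw [if_neg hk, ih, PySem.Dict.getD_modify]
      rw [← pvKeyA_eq]
      by_cases he : al = pvKeyA c
      · simp [he]
      · have : (pvKeyA c == al) = false := by simp [Ne.symm he]
        simp [he, this]

theorem loops_eq (columns : List String) (aliases : List String)
    (h : ∀ a ∈ aliases, a ≠ "") :
    detectA_loop (columns.foldl (fun d col =>
      let key := pvKeyA col
      if key = "" then d else d.modify key [] (fun v => v ++ [col])) PySem.Dict.empty) aliases
    = detectB_loop columns aliases := by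
  induction aliases with
  | nil => rfl
  | cons a rest ih =>
    have ha : a ≠ "" := h a (by simp)
    have hcand := getD_fold columns PySem.Dict.empty a ha
    simp only [PySem.Dict.getD_empty, List.nil_append] at hcand
    show detectA_loop _ (a :: rest) = detectB_loop columns (a :: rest)
    unfold detectA_loop detectB_loop
    rw [hcand]
    by_cases hc : List.filter (fun col => PySem.Str.lower (PySem.Str.strip col) == a) columns = []
    · simp only [hc]
      simp only [↓reduceIte]
      exact ih (fun x hx => h x (by simp [hx]))
    · simp only [if_neg hc]

-- ===== VERDICT (by name: the statement is the Claim_ definition above) =====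
theorem detect_text_column_spec : Claim_equal_detect_text_column := by
  intro columns _
  show detect_text_column columns = detect_text_column_alt columns
  unfold detect_text_column detect_text_column_alt
  exact loops_eq columns pvAliases (by decide)
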